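-- pv_equiv track=rewrite | github.com/spcl/dace | dace/soft_hier/utils/noc_solver.py | initial_assignment
-- ===== SOURCE A (Python) =====
-- def initial_assignment(p):
--     """
--     For a p x p grid (with p even), assign each cell as "L" or "B" so that each row
--     and each column gets exactly p/2 L's and p/2 B's.
--
--     Method: For each row r, assign "L" to those columns c for which (c - r) mod p is less than p/2,
--     and "B" otherwise.
--     """
--     assignment = {}
--     half = p // 2
--     for r in range(p):
--         for c in range(p):
--             if (c - r) % p < half:
--                 assignment[(c, r)] = "L"
--             else:
--                 assignment[(c, r)] = "B"
--     return assignment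
-- ===== SOURCE B (Python) =====
-- def initial_assignment(p):
--     # Start from row 0's pattern and obtain each next row by rotating the
--     # previous row one step to the right; no per-cell arithmetic is done.
--     half = p // 2
--     row = ["L"] * half + ["B"] * (p - half)
--     assignment = {}
--     for r in range(p):
--         for c, lab in enumerate(row):
--             assignment[(c, r)] = lab
--         row = row[-1:] + row[:-1]
--     return assignment
-- ===== Notes on version B (the rewrite author's own statement) =====
-- stated objective: alternative
-- what changed: B computes no per-cell modulo at all: it carries the current row's label list as loop state, filling row r by enumerating it and producing the next row by a one-step cyclic right rotation (row[-1:] + row[:-1]), whereas A tests (c - r) % p < p//2 for every cell.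
import Mathlib
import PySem

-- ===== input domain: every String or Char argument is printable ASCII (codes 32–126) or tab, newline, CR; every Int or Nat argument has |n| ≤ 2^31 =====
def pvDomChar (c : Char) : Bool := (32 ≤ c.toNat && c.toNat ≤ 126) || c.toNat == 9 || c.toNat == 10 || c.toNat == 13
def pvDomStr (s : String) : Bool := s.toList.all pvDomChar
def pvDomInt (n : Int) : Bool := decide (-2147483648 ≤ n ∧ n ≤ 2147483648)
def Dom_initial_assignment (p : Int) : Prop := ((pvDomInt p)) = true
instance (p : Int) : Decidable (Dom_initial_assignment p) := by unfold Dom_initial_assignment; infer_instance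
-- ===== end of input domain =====

-- B carries the row's label list as loop state and rotates it one step per row
-- (row[-1:] + row[:-1]), doing no per-cell modulo; objective: alternative.

-- ===== PORT A =====
-- per-cell branch: (c - r) % p < p // 2 decides "L"/"B"
def initial_assignment (p : Int) : List (Int × Int × String) :=
  let half := PySem.Int.floordiv p 2
  let d : PySem.Dict (Int × Int) String :=
    (PySem.List.pyRange 0 p 1).foldl (fun d r =>
      (PySem.List.pyRange 0 p 1).foldl (fun d c =>
        if PySem.Int.mod (c - r) p < half then d.insert (c, r) "L"
        else d.insert (c, r) "B") d) PySem.Dict.empty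
  d.items.map (fun kv => (kv.1.1, kv.1.2, kv.2))

-- ===== PORT B =====
-- state = (dict, current row); row r is enumerated into the dict, then the row
-- is rotated right by one: row[-1:] + row[:-1]
def initial_assignment_alt (p : Int) : List (Int × Int × String) :=
  let half := PySem.Int.floordiv p 2
  let st :=
    (PySem.List.pyRange 0 p 1).foldl
      (fun (st : PySem.Dict (Int × Int) String × List String) r =>
        ((PySem.List.enumerate st.2).foldl (fun d cl => d.insert (cl.1, r) cl.2) st.1,
         PySem.List.slice st.2 (some (-1)) none ++ PySem.List.slice st.2 none (some (-1))))
      (PySem.Dict.empty, List.replicate half.toNat "L" ++ List.replicate (p - half).toNat "B")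
  st.1.items.map (fun kv => (kv.1.1, kv.1.2, kv.2))

-- ===== PRECONDITION & SPEC =====
def Spec_initial_assignment (p : Int) (out : List (Int × Int × String)) : Prop := out = initial_assignment_alt p
instance (p : Int) (out : List (Int × Int × String)) : Decidable (Spec_initial_assignment p out) := by unfold Spec_initial_assignment; infer_instance

-- ===== CLAIM (what is proved, stated in full; the proofs are below) =====
def Claim_equal_initial_assignment : Prop := ∀ (p : Int), Dom_initial_assignment p → Spec_initial_assignment p (initial_assignment p)

-- ===== LEMMAS AND PROOFS =====

-- the label A computes for cell (c, r)
def pvLab (p r c : Int) : String :=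
  if PySem.Int.mod (c - r) p < PySem.Int.floordiv p 2 then "L" else "B"

-- the row of labels A produces for row r
def pvRow (p r : Int) : List String := (PySem.List.pyRange 0 p 1).map (fun c => pvLab p r c)

lemma pvRow_length (p r : Int) : (pvRow p r).length = p.toNat := by
  simp [pvRow, PySem.List.length_pyRange_one]

-- pvLab depends only on c - r
lemma pvLab_congr (p r c r' c' : Int) (h : c - r = c' - r') :
    pvLab p r c = pvLab p r' c' := by
  unfold pvLab
  rw [h]

-- labels of cells whose (c - r) differ by p coincide
lemma pvLab_shift (p r c r' c' : Int) (hp : 0 < p) (h : c - r = c' - r' + p) :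
    pvLab p r c = pvLab p r' c' := by
  unfold pvLab
  rw [h, PySem.Int.mod_eq_emod_of_pos hp, PySem.Int.mod_eq_emod_of_pos hp,
    show c' - r' + p = c' - r' + p * 1 by ring, Int.add_mul_emod_self_left]

-- B's initial row is A's row 0
lemma base_eq_row0 (p : Int) (hp : 0 < p) :
    List.replicate (PySem.Int.floordiv p 2).toNat "L" ++
      List.replicate (p - PySem.Int.floordiv p 2).toNat "B" = pvRow p 0 := by
  have hfd : PySem.Int.floordiv p 2 = p / 2 := PySem.Int.floordiv_eq_ediv_of_pos (by omega)
  have h1 : 0 ≤ p / 2 := by omega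
  have h2 : p / 2 ≤ p := by omega
  apply List.ext_getElem
  · simp [pvRow_length]; omega
  · intro i hi _
    have hip : (i : Int) < p := by
      have := pvRow_length p 0
      omega
    simp only [pvRow, List.getElem_map, PySem.List.getElem_pyRange_one]
    have hmod : PySem.Int.mod ((0 + (i : Int)) - 0) p = (i : Int) := by
      rw [show ((0 : Int) + (i : Int)) - 0 = (i : Int) by ring,
        PySem.Int.mod_eq_emod_of_pos hp]
      exact Int.emod_eq_of_lt (by omega) hip
    rw [pvLab, hmod]
    by_cases h : (i : Int) < PySem.Int.floordiv p 2
    · have h' := h; rw [hfd] at h'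
      rw [if_pos h, List.getElem_append_left (by simp; omega)]
      simp
    · have h' := h; rw [hfd] at h'
      rw [if_neg h, List.getElem_append_right (by simp; omega)]
      simp

-- row[-1:] = the last label of row r
lemma drop_row (p r : Int) (hp : 0 < p) :
    (pvRow p r).drop ((pvRow p r).length - 1) = [pvLab p r (p - 1)] := by
  have hlen := pvRow_length p r
  apply List.ext_getElem
  · simp [hlen]; omega
  · intro i hi hi'
    have hi0 : i = 0 := by simp at hi'; omega
    subst hi0
    rw [List.getElem_drop]
    simp only [pvRow, List.getElem_map, PySem.List.getElem_pyRange_one,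
      List.getElem_cons_zero]
    apply pvLab_congr
    have hlen2 : (List.map (fun c => pvLab p r c) (PySem.List.pyRange 0 p 1)).length
        = p.toNat := by
      simp [PySem.List.length_pyRange_one]
    rw [hlen2]
    push_cast
    omega

-- row r+1 is last-label-of-row-r consed onto row r without its last label
lemma row_succ (p r : Int) (hp : 0 < p) :
    pvRow p (r + 1) = pvLab p r (p - 1) :: (pvRow p r).dropLast := by
  have hlen := pvRow_length p r
  apply List.ext_getElem
  · rw [pvRow_length, List.length_cons, List.length_dropLast, hlen]
    omega
  · intro i hi hi'
    have hip : (i : Int) < p := by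
      have := pvRow_length p (r + 1)
      omega
    have hL : (pvRow p (r + 1))[i] = pvLab p (r + 1) (0 + (i : Int)) := by
      simp only [pvRow, List.getElem_map, PySem.List.getElem_pyRange_one]
    rw [hL]
    rcases Nat.eq_zero_or_pos i with h0 | hposi
    · subst h0
      simp only [List.getElem_cons_zero]
      symm
      apply pvLab_shift p _ _ _ _ hp
      push_cast
      omega
    · obtain ⟨j, rfl⟩ : ∃ j, i = j + 1 := ⟨i - 1, by omega⟩
      rw [List.getElem_cons_succ, List.getElem_dropLast]
      simp only [pvRow, List.getElem_map, PySem.List.getElem_pyRange_one]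
      apply pvLab_congr
      push_cast
      omega

-- A's inner loop inserts exactly pvLab at each cell
lemma innerA_eq (p r : Int) (d : PySem.Dict (Int × Int) String) :
    (PySem.List.pyRange 0 p 1).foldl (fun d c =>
        if PySem.Int.mod (c - r) p < PySem.Int.floordiv p 2 then d.insert (c, r) "L"
        else d.insert (c, r) "B") d
    = (PySem.List.pyRange 0 p 1).foldl (fun d c => d.insert (c, r) (pvLab p r c)) d := by
  apply PySem.List.foldl_congr_mem
  intro d c _
  unfold pvLab
  split <;> rfl

-- B's inner loop over the enumerated row r equals A's inner loop
lemma innerB_eq (p r : Int) (hp : 0 < p) (d : PySem.Dict (Int × Int) String) :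
    (PySem.List.enumerate (pvRow p r)).foldl (fun d cl => d.insert (cl.1, r) cl.2) d
    = (PySem.List.pyRange 0 p 1).foldl (fun d c => d.insert (c, r) (pvLab p r c)) d := by
  rw [PySem.List.enumerate_eq_map_pyRange (d := "")]
  rw [List.foldl_map]
  have hlen : ((PySem.List.len (pvRow p r)) : Int) = p := by
    simp [PySem.List.len_eq, pvRow_length]; omega
  rw [hlen]
  apply PySem.List.foldl_congr_mem
  intro d c hc
  rw [PySem.List.mem_pyRange_one] at hc
  have : PySem.List.pyGetD (pvRow p r) c "" = pvLab p r c := by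
    have := PySem.List.pyGetD_map_pyRange_of_nonneg (f := fun c => pvLab p r c)
      (n := p) (i := c) (d := "") hc.1 hc.2
    simpa [pvRow] using this
  rw [this]

-- rotating row r one step to the right yields row r+1
lemma rotate_row (p r : Int) (hp : 0 < p) :
    PySem.List.slice (pvRow p r) (some (-1)) none ++
      PySem.List.slice (pvRow p r) none (some (-1)) = pvRow p (r + 1) := by
  rw [PySem.List.slice_from_neg_one, PySem.List.slice_to_neg_one, drop_row p r hp,
    row_succ p r hp]
  rfl

-- the main loop: B's (dict, row) fold computes A's dict fold
lemma main_loop (p : Int) (hp : 0 < p) :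
    ∀ (k : Nat) (r : Int), r = p - k →
      ∀ (d : PySem.Dict (Int × Int) String),
        ((PySem.List.pyRange r p 1).foldl
          (fun (st : PySem.Dict (Int × Int) String × List String) r =>
            ((PySem.List.enumerate st.2).foldl (fun d cl => d.insert (cl.1, r) cl.2) st.1,
             PySem.List.slice st.2 (some (-1)) none ++ PySem.List.slice st.2 none (some (-1))))
          (d, pvRow p r)).1
        = (PySem.List.pyRange r p 1).foldl (fun d r =>
            (PySem.List.pyRange 0 p 1).foldl (fun d c => d.insert (c, r) (pvLab p r c)) d) d := by
  intro k
  induction k with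
  | zero =>
      intro r hr d
      rw [PySem.List.pyRange_one_eq_nil (by omega)]
      rfl
  | succ n ih =>
      intro r hr d
      rcases le_or_gt p r with hle | hlt
      · rw [PySem.List.pyRange_one_eq_nil (by omega)]
        rfl
      · rw [PySem.List.pyRange_one_cons hlt]
        simp only [List.foldl_cons]
        rw [rotate_row p r hp, innerB_eq p r hp d]
        exact ih (r + 1) (by push_cast at hr ⊢; omega) _

-- ===== VERDICT (by name: the statement is the Claim_ definition above) =====
theorem initial_assignment_spec : Claim_equal_initial_assignment := by
  intro p _
  unfold Spec_initial_assignment initial_assignment initial_assignment_alt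
  simp only
  rcases le_or_gt p 0 with hp | hp
  · rw [PySem.List.pyRange_one_eq_nil (by omega : p ≤ 0)]
    rfl
  · rw [base_eq_row0 p hp, main_loop p hp p.toNat 0 (by omega)]
    have h : (PySem.List.pyRange 0 p 1).foldl (fun d r =>
          (PySem.List.pyRange 0 p 1).foldl (fun d c =>
            if PySem.Int.mod (c - r) p < PySem.Int.floordiv p 2 then d.insert (c, r) "L"
            else d.insert (c, r) "B") d) (PySem.Dict.empty : PySem.Dict (Int × Int) String)
        = (PySem.List.pyRange 0 p 1).foldl (fun d r =>
          (PySem.List.pyRange 0 p 1).foldl (fun d c => d.insert (c, r) (pvLab p r c)) d)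
          PySem.Dict.empty := by
      apply PySem.List.foldl_congr_mem
      intro d r _
      exact innerA_eq p r d
    rw [h]
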